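-- pv_equiv track=rewrite | github.com/mamilla11/python-project-lvl1 | brain_games/games/prime.py | get_correct_answer
-- ===== SOURCE A (Python) =====
-- def get_correct_answer(value):
--     dividers = []
--
--     for i in range(1, value):
--         if value % i == 0:
--             dividers.append(i)
--
--     if len(dividers) == 2:
--         return 'yes'
--     else:
--         return 'no'
-- ===== SOURCE B (Python) =====
-- def get_correct_answer(value):
--     # Count ALL divisors of value by sqrt pairing; 'yes' iff the total is 3
--     # (3 total divisors == exactly 2 divisors strictly below value).
--     if value < 1:
--         return 'no'
--     total = 0
--     i = 1
--     while i * i <= value: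
--         if value % i == 0:
--             total += 1 if i * i == value else 2
--         i += 1
--     return 'yes' if total == 3 else 'no'
-- ===== Notes on version B (the rewrite author's own statement) =====
-- stated objective: faster
-- what changed: Instead of scanning every candidate below value and collecting proper divisors into a list, B counts all divisors by trial division up to the square root (pairing each small divisor with its cofactor) and answers 'yes' iff the total divisor count is 3.
import Mathlib
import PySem

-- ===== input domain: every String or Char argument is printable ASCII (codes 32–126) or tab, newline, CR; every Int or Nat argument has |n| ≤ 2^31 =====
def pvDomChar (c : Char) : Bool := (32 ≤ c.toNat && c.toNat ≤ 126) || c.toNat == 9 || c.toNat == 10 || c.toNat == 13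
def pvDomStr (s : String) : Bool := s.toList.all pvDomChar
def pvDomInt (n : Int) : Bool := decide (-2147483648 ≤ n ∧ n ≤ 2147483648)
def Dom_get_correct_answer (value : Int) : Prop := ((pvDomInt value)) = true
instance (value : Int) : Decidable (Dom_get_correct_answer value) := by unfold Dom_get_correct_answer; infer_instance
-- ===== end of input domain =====

-- B replaces A's scan of every i in [1, value) with trial division up to the square root,
-- counting all divisors by pairing i with value / i and answering 'yes' iff the total is 3.


-- ===== PORT A =====
def get_correct_answer (value : Int) : String :=
  let dividers := (PySem.List.pyRange 1 value).foldl
    (fun acc i => if PySem.Int.mod value i == 0 then acc ++ [i] else acc) ([] : List Int)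
  if dividers.length == 2 then "yes" else "no"

-- ===== PORT B =====
-- while i * i <= value: if value % i == 0: total += 1 if i*i == value else 2; i += 1
def pvBLoop (value i total : Int) : Int :=
  if i * i ≤ value then
    pvBLoop value (i + 1)
      (if PySem.Int.mod value i == 0 then total + (if i * i == value then 1 else 2) else total)
  else total
termination_by (value + 1 - i).toNat
decreasing_by
  have h1 : i ≤ i * i := by nlinarith [mul_self_nonneg i, mul_self_nonneg (i - 1)]
  omega

def get_correct_answer_alt (value : Int) : String :=
  if value < 1 then "no"
  else if pvBLoop value 1 0 == 3 then "yes" else "no"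

-- ===== PRECONDITION & SPEC =====
def Spec_get_correct_answer (value : Int) (out : String) : Prop := out = get_correct_answer_alt value
instance (value : Int) (out : String) : Decidable (Spec_get_correct_answer value out) := by unfold Spec_get_correct_answer; infer_instance

-- ===== CLAIM (what is proved, stated in full; the proofs are below) =====
def Claim_equal_get_correct_answer : Prop := ∀ (value : Int), Dom_get_correct_answer value → Spec_get_correct_answer value (get_correct_answer value)

-- ===== LEMMAS AND PROOFS =====

-- weight a divisor j ≤ √v carries in B's paired count
def pvW (v j : Nat) : Int := if j ∣ v then (if j * j = v then 1 else 2) else 0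


theorem countP_range_eq (n : Nat) (p : Nat → Prop) [DecidablePred p] :
    (List.range n).countP (fun k => decide (p k)) = ((Finset.range n).filter p).card := by
  simp [Finset.range, Finset.filter, Multiset.range, Multiset.filter, List.countP_eq_length_filter]

theorem pvA_count (v : Nat) (hv : 1 ≤ v) :
    ((PySem.List.pyRange 1 (v : Int)).foldl
      (fun acc i => if PySem.Int.mod (v : Int) i == 0 then acc ++ [i] else acc) ([] : List Int)).length
      + 1 = v.divisors.card := by
  rw [PySem.List.foldl_append_if (fun i => PySem.Int.mod (v : Int) i == 0) (fun i => i),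
     PySem.List.pyRange_one]
  have hcast : (((v : Int) - 1).toNat) = v - 1 := by omega
  rw [hcast, List.filter_map]
  simp only [List.nil_append, List.length_map, ← List.countP_eq_length_filter]
  have hpred : ((fun i => PySem.Int.mod (v : Int) i == 0) ∘ (fun k : Nat => 1 + (k : Int)))
      = fun k => decide ((1 + k) ∣ v) := by
    funext k
    have : (1 : Int) + (k : Int) = ((1 + k : Nat) : Int) := by push_cast; ring
    show (PySem.Int.mod (v : Int) (1 + (k:Int)) == 0) = decide ((1 + k) ∣ v)
    rw [this, PySem.Int.mod_natCast]
    rcases Nat.eq_zero_or_pos (v % (1 + k)) with h | h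
    · rw [h]; simp [Nat.dvd_iff_mod_eq_zero, h]
    · have h1 : ¬ (1 + k) ∣ v := by rw [Nat.dvd_iff_mod_eq_zero]; omega
      have h2 : v % (1 + k) ≠ 0 := by omega
      simp only [h1, decide_false]
      rw [beq_eq_false_iff_ne]
      exact fun he => h2 (by exact_mod_cast he)
  rw [hpred, countP_range_eq]
  have hbij : ((Finset.range (v-1)).filter (fun k => (1+k) ∣ v)).card
      = ((Finset.Ico 1 v).filter (· ∣ v)).card := by
    apply Finset.card_nbij' (fun k => 1 + k) (fun d => d - 1)
    · intro k hk
      simp only [Finset.coe_filter, Set.mem_setOf_eq, Finset.mem_range, Finset.mem_Ico] at *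
      exact ⟨⟨by omega, by omega⟩, hk.2⟩
    · intro d hd
      simp only [Finset.coe_filter, Set.mem_setOf_eq, Finset.mem_range, Finset.mem_Ico] at *
      refine ⟨by omega, ?_⟩
      have : 1 + (d - 1) = d := by omega
      rw [this]; exact hd.2
    · intro k hk; simp
    · intro d hd
      simp only [Finset.coe_filter, Set.mem_setOf_eq, Finset.mem_Ico] at hd
      show 1 + (d - 1) = d
      omega
  rw [hbij]
  -- divisors v = insert v ((Ico 1 v).filter (· ∣ v))
  have hins : v.divisors = insert v ((Finset.Ico 1 v).filter (· ∣ v)) := by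
    ext d
    simp only [Nat.mem_divisors, Finset.mem_insert, Finset.mem_filter, Finset.mem_Ico]
    constructor
    · rintro ⟨hd, hv0⟩
      by_cases h : d = v
      · exact Or.inl h
      · right
        have h1 : 1 ≤ d := Nat.one_le_iff_ne_zero.mpr (by rintro rfl; simp at hd; omega)
        have h2 : d ≤ v := Nat.le_of_dvd (by omega) hd
        exact ⟨⟨h1, by omega⟩, hd⟩
    · rintro (rfl | ⟨⟨h1, h2⟩, hd⟩)
      · exact ⟨dvd_rfl, by omega⟩
      · exact ⟨hd, by omega⟩
  rw [hins, Finset.card_insert_of_notMem (by simp [Finset.mem_Ico])]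


theorem pvB_loop_sum (v : Nat) (n : Nat) : ∀ (a : Nat) (t : Int), v.sqrt + 1 - a = n → 1 ≤ a →
    pvBLoop (v : Int) (a : Int) t = t + ∑ j ∈ Finset.Ico a (v.sqrt + 1), pvW v j := by
  induction n with
  | zero =>
    intro a t hn ha
    have hgt : v < a * a := by
      have : v.sqrt < a := by omega
      exact Nat.sqrt_lt.mp this
    rw [pvBLoop]
    rw [if_neg (by exact_mod_cast not_le.mpr (by exact_mod_cast Int.ofNat_lt.mpr hgt))]
    rw [Finset.Ico_eq_empty (by omega), Finset.sum_empty, add_zero]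
  | succ m ih =>
    intro a t hn ha
    have hle : a ≤ v.sqrt := by omega
    have hin : a * a ≤ v := Nat.le_sqrt.mp hle
    rw [Finset.sum_eq_sum_Ico_succ_bot (show a < v.sqrt + 1 by omega) (pvW v)]
    rw [pvBLoop, if_pos (by exact_mod_cast Int.ofNat_le.mpr hin)]
    rw [show ((a:Int) + 1) = ((a + 1 : Nat) : Int) by push_cast; ring]
    rw [ih (a + 1) _ (by omega) (by omega)]
    have hmod : (PySem.Int.mod (v:Int) (a:Int) == 0) = decide (a ∣ v) := by
      rw [PySem.Int.mod_natCast]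
      rcases Nat.eq_zero_or_pos (v % a) with h | h
      · rw [h]; simp [Nat.dvd_iff_mod_eq_zero, h]
      · have h1 : ¬ a ∣ v := by rw [Nat.dvd_iff_mod_eq_zero]; omega
        simp only [h1, decide_false]
        rw [beq_eq_false_iff_ne]
        exact fun he => h1 (by simpa [Nat.dvd_iff_mod_eq_zero] using (by exact_mod_cast he : v % a = 0))
    have hsq : ((a:Int) * a == (v:Int)) = decide (a * a = v) := by
      rw [show ((a:Int) * a) = ((a*a : Nat) : Int) by push_cast; ring]
      rcases eq_or_ne (a*a) v with h | h
      · simp [h]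
      · simp only [h, decide_false]
        rw [beq_eq_false_iff_ne]
        exact fun he => h (by exact_mod_cast he)
    rw [hmod, hsq]
    unfold pvW
    by_cases hd : a ∣ v <;> by_cases he : a * a = v <;> simp [hd, he] <;> ring


theorem pvPair (v : Nat) (hv : 1 ≤ v) :
    (v.divisors.filter (fun j => j * j < v)).card
      = (v.divisors.filter (fun j => v < j * j)).card := by
  apply Finset.card_nbij' (fun d => v / d) (fun d => v / d)
  · intro d hd
    simp only [Finset.coe_filter, Set.mem_setOf_eq, Nat.mem_divisors] at *
    obtain ⟨⟨hdvd, hv0⟩, hlt⟩ := hd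
    have hd0 : 0 < d := Nat.pos_of_dvd_of_pos hdvd (by omega)
    have hmul : d * (v / d) = v := Nat.mul_div_cancel' hdvd
    have hgt : d < v / d := by nlinarith
    refine ⟨⟨Nat.div_dvd_of_dvd hdvd, hv0⟩, ?_⟩
    nlinarith
  · intro d hd
    simp only [Finset.coe_filter, Set.mem_setOf_eq, Nat.mem_divisors] at *
    obtain ⟨⟨hdvd, hv0⟩, hlt⟩ := hd
    have hd0 : 0 < d := Nat.pos_of_dvd_of_pos hdvd (by omega)
    have hmul : d * (v / d) = v := Nat.mul_div_cancel' hdvd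
    have hq0 : 0 < v / d := by
      rcases Nat.eq_zero_or_pos (v / d) with h | h
      · rw [h, mul_zero] at hmul; omega
      · exact h
    have hgt : v / d < d := by nlinarith
    refine ⟨⟨Nat.div_dvd_of_dvd hdvd, hv0⟩, ?_⟩
    nlinarith
  · intro d hd
    simp only [Finset.coe_filter, Set.mem_setOf_eq, Nat.mem_divisors] at hd
    exact Nat.div_div_self hd.1.1 hd.1.2
  · intro d hd
    simp only [Finset.coe_filter, Set.mem_setOf_eq, Nat.mem_divisors] at hd
    exact Nat.div_div_self hd.1.1 hd.1.2

theorem pvB_sum (v : Nat) (hv : 1 ≤ v) :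
    ∑ j ∈ Finset.Ico 1 (v.sqrt + 1), pvW v j = (v.divisors.card : Int) := by
  have h1 : ∑ j ∈ Finset.Ico 1 (v.sqrt + 1), pvW v j
      = ∑ j ∈ Finset.Ico 1 (v.sqrt + 1),
          ((if j ∣ v then (1:Int) else 0) + (if j ∣ v ∧ j * j < v then 1 else 0)) := by
    apply Finset.sum_congr rfl
    intro j hj
    rw [Finset.mem_Ico] at hj
    have hj2 : j * j ≤ v := Nat.le_sqrt.mp (by omega)
    unfold pvW
    by_cases hd : j ∣ v
    · by_cases he : j * j = v
      · simp [hd, he]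
      · simp [hd, he, lt_of_le_of_ne hj2 he]
    · simp [hd]
  rw [h1, Finset.sum_add_distrib, Finset.sum_boole, Finset.sum_boole]
  have e1 : (Finset.Ico 1 (v.sqrt + 1)).filter (fun j => j ∣ v)
      = v.divisors.filter (fun j => j * j ≤ v) := by
    ext j
    simp only [Finset.mem_filter, Finset.mem_Ico, Nat.mem_divisors]
    constructor
    · rintro ⟨⟨h1j, h2j⟩, hd⟩
      exact ⟨⟨hd, by omega⟩, Nat.le_sqrt.mp (by omega)⟩
    · rintro ⟨⟨hd, _⟩, hsq⟩
      have hj0 : 0 < j := Nat.pos_of_dvd_of_pos hd (by omega)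
      exact ⟨⟨by omega, by have := Nat.le_sqrt.mpr hsq; omega⟩, hd⟩
  have e2 : (Finset.Ico 1 (v.sqrt + 1)).filter (fun j => j ∣ v ∧ j * j < v)
      = v.divisors.filter (fun j => j * j < v) := by
    ext j
    simp only [Finset.mem_filter, Finset.mem_Ico, Nat.mem_divisors]
    constructor
    · rintro ⟨⟨h1j, h2j⟩, hd, hlt⟩
      exact ⟨⟨hd, by omega⟩, hlt⟩
    · rintro ⟨⟨hd, _⟩, hlt⟩
      have hj0 : 0 < j := Nat.pos_of_dvd_of_pos hd (by omega)
      exact ⟨⟨by omega, by have := Nat.le_sqrt.mpr (le_of_lt hlt); omega⟩, hd, hlt⟩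
  rw [e1, e2, pvPair v hv]
  have e3 : (v.divisors.filter (fun j => j * j ≤ v)).card
        + (v.divisors.filter (fun j => v < j * j)).card = v.divisors.card := by
    have h := Finset.card_filter_add_card_filter_not (s := v.divisors) (p := fun j => j * j ≤ v)
    rw [show v.divisors.filter (fun j => ¬ j * j ≤ v) = v.divisors.filter (fun j => v < j * j) from
      Finset.filter_congr (fun j _ => by simp [not_le])] at h
    exact h
  push_cast [← e3]
  ring

-- ===== VERDICT (by name: the statement is the Claim_ definition above) =====
theorem get_correct_answer_spec : Claim_equal_get_correct_answer := by
  intro value _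
  unfold Spec_get_correct_answer get_correct_answer get_correct_answer_alt
  by_cases hneg : value < 1
  · rw [if_pos hneg]
    have hempty : PySem.List.pyRange 1 value = [] := by
      rw [PySem.List.pyRange_one]
      have h0 : (value - 1).toNat = 0 := by omega
      rw [h0]; rfl
    simp [hempty]
  · rw [if_neg hneg]
    obtain ⟨v, rfl⟩ : ∃ v : Nat, value = ↑v := ⟨value.toNat, by omega⟩
    have hv : 1 ≤ v := by omega
    have hA := pvA_count v hv
    have hB := pvB_loop_sum v (v.sqrt + 1 - 1) 1 0 rfl (le_refl 1)
    rw [pvB_sum v hv, zero_add] at hB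
    rw [show ((1:Nat):Int) = 1 from rfl] at hB
    rw [hB]
    by_cases hc : v.divisors.card = 3
    · have hlen : ((PySem.List.pyRange 1 (v:Int)).foldl
        (fun acc i => if PySem.Int.mod (v:Int) i == 0 then acc ++ [i] else acc) ([] : List Int)).length = 2 := by omega
      simp [hc]
      simpa using hlen
    · have hlen : ((PySem.List.pyRange 1 (v:Int)).foldl
        (fun acc i => if PySem.Int.mod (v:Int) i == 0 then acc ++ [i] else acc) ([] : List Int)).length ≠ 2 := by omega
      have hcast : ((v.divisors.card : Int) == 3) = false := by
        rw [beq_eq_false_iff_ne]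
        exact fun he => hc (by exact_mod_cast he)
      simp [hcast]
      simpa using hlen
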